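-- pv_equiv track=rewrite | github.com/vambrosi/SFH-Handlebodies | basics.py | differ_by_two
-- ===== SOURCE A (Python) =====
-- def singletons(n):
--     '''Yields the powers of two present in the binary expansion of a number.
--     Equivalently, it yields the one elements subsets of n (viewed as a set).'''
--
--     while n:
--         b = n & (~n+1)
--         yield b
--         n ^= b
--
-- def differ_by_two(S, T):
--     ''' This function answer the question: is the cardinality of the symmetric
--     difference of those two sets equal to two?'''
--     symmetric_difference = S ^ T
--
--     size = 0
--     for _ in singletons(symmetric_difference):
--         size += 1
--         if size > 2:
--             return False
--
--     if size < 2: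
--         return False
--     else:
--         return True
-- ===== SOURCE B (Python) =====
-- def differ_by_two(S, T):
--     # Closed-form bit trick: clear the lowest set bit of the symmetric
--     # difference; it had exactly two set bits iff what remains is a
--     # nonzero power of two (works for negative masks too: then both
--     # y and y&(y-1) stay nonzero negative, giving False, as A does).
--     x = S ^ T
--     y = x & (x - 1)
--     return y != 0 and (y & (y - 1)) == 0
-- ===== Notes on version B (the rewrite author's own statement) =====
-- stated objective: simpler
-- what changed: Replaced A's generator that peels singleton bits one by one with an early-exit counter by a branch-free closed-form check: clear the lowest set bit once (y = x & (x-1)) and test that y is a nonzero power of two (y & (y-1) == 0).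
import Mathlib
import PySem

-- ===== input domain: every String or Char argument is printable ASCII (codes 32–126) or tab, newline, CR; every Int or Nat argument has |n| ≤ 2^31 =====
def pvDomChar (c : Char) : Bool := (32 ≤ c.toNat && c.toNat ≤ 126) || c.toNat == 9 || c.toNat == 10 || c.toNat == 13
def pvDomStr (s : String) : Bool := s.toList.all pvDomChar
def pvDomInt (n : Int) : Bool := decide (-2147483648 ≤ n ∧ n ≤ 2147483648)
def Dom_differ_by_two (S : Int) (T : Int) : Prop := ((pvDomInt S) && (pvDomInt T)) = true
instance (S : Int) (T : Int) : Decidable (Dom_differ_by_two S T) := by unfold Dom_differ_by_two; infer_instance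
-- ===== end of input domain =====

-- B replaces A's bit-peeling generator loop with the closed-form check
-- "clear the lowest set bit once, then test for a nonzero power of two"
-- (simpler: no loop, no counter); proved equal on the whole domain.


-- ===== PORT A =====
-- A's for-loop over singletons(symmetric_difference) with the running size
-- counter: each iteration takes the lowest set bit b = n & (~n+1), removes it
-- with n ^= b, bumps size and early-returns False once size > 2; when the
-- generator is exhausted (n = 0) A returns (size < 2) → False else True.
-- The early return bounds the recursion depth by 3, hence termination_by.
def differ_by_two_loop (n : Int) (size : Nat) : Bool :=
  if n ≠ 0 then
    let b := PySem.Int.band n (Int.not n + 1)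
    if h : size + 1 > 2 then false
    else differ_by_two_loop (PySem.Int.bxor n b) (size + 1)
  else
    if size < 2 then false else true
termination_by 3 - size
decreasing_by omega

def differ_by_two (S : Int) (T : Int) : Bool :=
  differ_by_two_loop (PySem.Int.bxor S T) 0

-- ===== PORT B =====
def differ_by_two_alt (S : Int) (T : Int) : Bool :=
  let x := PySem.Int.bxor S T
  let y := PySem.Int.band x (x - 1)
  decide (y ≠ 0) && decide (PySem.Int.band y (y - 1) = 0)

-- ===== PRECONDITION & SPEC =====
def Spec_differ_by_two (S : Int) (T : Int) (out : Bool) : Prop := out = differ_by_two_alt S T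
instance (S : Int) (T : Int) (out : Bool) : Decidable (Spec_differ_by_two S T out) := by unfold Spec_differ_by_two; infer_instance

-- ===== CLAIM (what is proved, stated in full; the proofs are below) =====
def Claim_equal_differ_by_two : Prop := ∀ (S : Int) (T : Int), Dom_differ_by_two S T → Spec_differ_by_two S T (differ_by_two S T)

-- ===== LEMMAS AND PROOFS =====

-- ~n + 1 = -n on Int.
lemma pv_not_add_one (n : Int) : Int.not n + 1 = -n := by
  cases n with
  | ofNat m => show Int.negSucc m + 1 = _; simp [Int.negSucc_eq]
  | negSucc m => show (m : Int) + 1 = _; simp [Int.negSucc_eq]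

-- The two Nat-level facts about clearing the lowest set bit
-- L(p) := p - (p &&& (p-1)):  p ^^^ L(p) = p &&& (p-1)  and
-- (p-1) ^^^ L(p) = (p-1) ||| p, proved together by binary strong induction.
lemma pv_lowbit (p : Nat) (hp : 0 < p) :
    p ^^^ (p - (p &&& (p - 1))) = p &&& (p - 1) ∧
    (p - 1) ^^^ (p - (p &&& (p - 1))) = (p - 1) ||| p := by
  induction p using Nat.strong_induction_on with
  | _ p IH =>
    rcases Nat.even_or_odd p with ⟨r, hr⟩ | ⟨r, hr⟩
    · -- p = 2r, r > 0
      have hr0 : 0 < r := by omega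
      obtain ⟨ih1, ih2⟩ := IH r (by omega) hr0
      have hb1 : p = Nat.bit false r := by rw [Nat.bit_val]; simp; omega
      have hb2 : p - 1 = Nat.bit true (r - 1) := by rw [Nat.bit_val]; simp; omega
      have ha : p &&& (p - 1) = Nat.bit false (r &&& (r - 1)) := by
        rw [hb2, hb1, Nat.land_bit]
        simp
      have hle : r &&& (r - 1) ≤ r := Nat.and_le_left
      have hL : p - (p &&& (p - 1)) = Nat.bit false (r - (r &&& (r - 1))) := by
        rw [ha, hb1] at *
        rw [Nat.bit_val, Nat.bit_val] at *
        simp at *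
        omega
      refine ⟨?_, ?_⟩
      · rw [hL, ha, hb1, Nat.xor_bit]
        simp [ih1]
      · rw [hL, hb2, hb1, Nat.xor_bit, Nat.lor_bit]
        simp [ih2]
    · -- p = 2r + 1
      have hb1 : p = Nat.bit true r := by rw [Nat.bit_val]; simp; omega
      have hb2 : p - 1 = Nat.bit false r := by rw [Nat.bit_val]; simp; omega
      have ha : p &&& (p - 1) = p - 1 := by
        rw [hb2, hb1, Nat.land_bit]
        simp [Nat.and_self]
      have hL : p - (p &&& (p - 1)) = Nat.bit true 0 := by
        rw [ha, Nat.bit_val]; simp; omega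
      refine ⟨?_, ?_⟩
      · rw [hL, ha, hb2, hb1, Nat.xor_bit]
        simp
      · rw [hL, hb2, hb1, Nat.xor_bit, Nat.lor_bit]
        simp

-- The key identity behind the equivalence: removing the lowest set bit by
-- n ^ (n & -n) (A's step) equals n & (n-1) (B's closed form), for every Int.
lemma pv_key (n : Int) :
    PySem.Int.bxor n (PySem.Int.band n (-n)) = PySem.Int.band n (n - 1) := by
  rcases lt_trichotomy n 0 with hn | hn | hn
  · -- n < 0
    set p : Nat := (-n).toNat with hpdef
    have hp : 0 < p := by omega
    have hn' : n = -(p : Int) := by omega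
    have e1 : PySem.Int.band n (-n) = ((p - (p &&& (p - 1)) : Nat) : Int) := by
      unfold PySem.Int.band
      rw [if_neg (by omega), if_pos (by omega)]
      have h1 : (-n).toNat = p := rfl
      have h2 : (-n - 1).toNat = p - 1 := by omega
      rw [h1, h2]
    have e2 : PySem.Int.bxor n ((p - (p &&& (p - 1)) : Nat) : Int) =
        -(( (p - 1) ^^^ (p - (p &&& (p - 1))) : Nat) : Int) - 1 := by
      unfold PySem.Int.bxor
      rw [if_neg (by omega), if_pos (by positivity)]
      have h2 : (-n - 1).toNat = p - 1 := by omega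
      rw [h2, Int.toNat_natCast]
    have e3 : PySem.Int.band n (n - 1) = -(((p - 1) ||| p : Nat) : Int) - 1 := by
      unfold PySem.Int.band
      rw [if_neg (by omega), if_neg (by omega)]
      have h2 : (-n - 1).toNat = p - 1 := by omega
      have h3 : (-(n - 1) - 1).toNat = p := by omega
      rw [h2, h3]
    rw [e1, e2, e3, (pv_lowbit p hp).2]
  · subst hn; decide
  · -- n > 0
    set m : Nat := n.toNat with hmdef
    have hm : 0 < m := by omega
    have e1 : PySem.Int.band n (-n) = ((m - (m &&& (m - 1)) : Nat) : Int) := by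
      unfold PySem.Int.band
      rw [if_pos (by omega), if_neg (by omega)]
      have h1 : n.toNat = m := rfl
      have h2 : (-(-n) - 1).toNat = m - 1 := by omega
      rw [h1, h2]
    have e2 : PySem.Int.bxor n ((m - (m &&& (m - 1)) : Nat) : Int) =
        ((m ^^^ (m - (m &&& (m - 1))) : Nat) : Int) := by
      unfold PySem.Int.bxor
      rw [if_pos (by omega), if_pos (by positivity)]
      have h1 : n.toNat = m := rfl
      rw [h1, Int.toNat_natCast]
    have e3 : PySem.Int.band n (n - 1) = ((m &&& (m - 1) : Nat) : Int) := by
      unfold PySem.Int.band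
      rw [if_pos (by omega), if_pos (by omega)]
      have h1 : n.toNat = m := rfl
      have h2 : (n - 1).toNat = m - 1 := by omega
      rw [h1, h2]
    rw [e1, e2, e3, (pv_lowbit m hm).1]

-- One unrolled step of A's loop, written with B's step function.
lemma pv_loop_step (n : Int) (size : Nat) (hn : n ≠ 0) (hs : ¬ size + 1 > 2) :
    differ_by_two_loop n size =
      differ_by_two_loop (PySem.Int.band n (n - 1)) (size + 1) := by
  rw [differ_by_two_loop]
  rw [if_pos hn, dif_neg hs, pv_not_add_one, pv_key]

lemma pv_loop_zero (size : Nat) :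
    differ_by_two_loop 0 size = if size < 2 then false else true := by
  rw [differ_by_two_loop]; simp

lemma pv_loop_stop (n : Int) (hn : n ≠ 0) :
    differ_by_two_loop n 2 = false := by
  rw [differ_by_two_loop]; rw [if_pos hn, dif_pos (by omega)]

-- ===== VERDICT (by name: the statement is the Claim_ definition above) =====
theorem differ_by_two_spec : Claim_equal_differ_by_two := by
  intro S T _
  unfold Spec_differ_by_two differ_by_two differ_by_two_alt
  show differ_by_two_loop (PySem.Int.bxor S T) 0 =
    (decide (PySem.Int.band (PySem.Int.bxor S T) (PySem.Int.bxor S T - 1) ≠ 0) &&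
     decide (PySem.Int.band
        (PySem.Int.band (PySem.Int.bxor S T) (PySem.Int.bxor S T - 1))
        (PySem.Int.band (PySem.Int.bxor S T) (PySem.Int.bxor S T - 1) - 1) = 0))
  generalize PySem.Int.bxor S T = x
  by_cases hx0 : x = 0
  · rw [hx0, pv_loop_zero]
    decide
  · rw [pv_loop_step x 0 hx0 (by omega)]
    generalize PySem.Int.band x (x - 1) = y
    by_cases hy0 : y = 0
    · rw [hy0, pv_loop_zero]
      simp
    · rw [pv_loop_step y 1 hy0 (by omega)]
      generalize PySem.Int.band y (y - 1) = z
      by_cases hz0 : z = 0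
      · rw [hz0, pv_loop_zero]
        simp [hy0]
      · rw [pv_loop_stop z hz0]
        simp [hy0, hz0]
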